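-- pv_equiv track=rewrite | github.com/gertjanbron/zornq | code/graph_coarsening.py | coarsen_graph
-- ===== SOURCE A (Python) =====
-- def coarsen_graph(n_nodes, adj, mapping, n_coarse):
--     """
--     Build coarsened graph from fine graph + mapping.
--
--     Edge weights are summed: w_coarse(A,B) = sum of w(u,v)
--     where u in A, v in B.
--     """
--     coarse_adj = {i: {} for i in range(n_coarse)}
--
--     for u in adj:
--         cu = mapping[u]
--         for v, w in adj[u].items():
--             cv = mapping[v]
--             if cu != cv:  # Skip internal edges (they don't affect cut)
--                 coarse_adj[cu][cv] = coarse_adj[cu].get(cv, 0) + w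
--
--     # The fine adjacency is symmetric: adj[u][v] and adj[v][u] both exist.
--     # So coarse_adj[A][B] accumulates from all fine (u->v) with u in A, v in B,
--     # and coarse_adj[B][A] accumulates from all fine (v->u) with v in B, u in A.
--     # Both directions hold the same total weight — already correct and symmetric.
--     return coarse_adj
-- ===== SOURCE B (Python) =====
-- def coarsen_graph(n_nodes, adj, mapping, n_coarse):
--     """Row by row: the coarse row of super-node i depends only on edges whose
--     source is mapped to i, so build each row with its own filtered scan of the
--     fine graph instead of accumulating all rows in one pass over a nested dict."""
--     def row(i):
--         r = {}
--         for u, nbrs in adj.items():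
--             if mapping[u] != i:
--                 continue
--             for v, w in nbrs.items():
--                 cv = mapping[v]
--                 if cv != i:
--                     r[cv] = r.get(cv, 0) + w
--         return r
--     return {i: row(i) for i in range(n_coarse)}
-- ===== Notes on version B (the rewrite author's own statement) =====
-- stated objective: alternative
-- what changed: B builds the coarse adjacency row by row: for each super-node i a separate filtered scan of the fine edges computes just that super-node's row, instead of A's single pass that mutates a nested dict of all rows at once; Pre_ additionally excludes association-list encodings with duplicate dict keys, which do not correspond to a Python dict input.
import Mathlib
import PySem

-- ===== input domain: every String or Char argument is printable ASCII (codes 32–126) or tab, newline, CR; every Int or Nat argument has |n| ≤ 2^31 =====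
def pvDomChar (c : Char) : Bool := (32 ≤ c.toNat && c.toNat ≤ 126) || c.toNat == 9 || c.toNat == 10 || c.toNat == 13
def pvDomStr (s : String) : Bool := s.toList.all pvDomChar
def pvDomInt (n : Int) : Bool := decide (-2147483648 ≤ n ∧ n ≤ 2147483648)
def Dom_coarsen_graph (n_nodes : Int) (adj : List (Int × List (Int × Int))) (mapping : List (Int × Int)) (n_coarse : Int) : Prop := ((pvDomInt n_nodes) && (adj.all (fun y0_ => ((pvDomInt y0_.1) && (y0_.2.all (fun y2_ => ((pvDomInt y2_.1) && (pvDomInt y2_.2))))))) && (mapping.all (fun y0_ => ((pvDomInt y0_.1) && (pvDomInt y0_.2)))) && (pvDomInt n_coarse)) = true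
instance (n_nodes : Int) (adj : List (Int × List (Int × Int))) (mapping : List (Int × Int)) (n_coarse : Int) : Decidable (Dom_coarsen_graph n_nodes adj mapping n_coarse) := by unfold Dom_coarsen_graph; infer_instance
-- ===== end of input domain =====

-- B builds the coarse adjacency row by row (one filtered scan of the fine edges per
-- super-node) instead of A's single pass over a nested dict of all rows; the claim is
-- about the return value only (neither version mutates its arguments).

-- ===== PORT A =====
-- inner loop body of A: 'for v, w in adj[u].items(): cv = mapping[v]; if cu != cv: coarse_adj[cu][cv] = coarse_adj[cu].get(cv, 0) + w'
-- ('coarse_adj[cu]' is ported with getD; Pre_ excludes the inputs where Python raises KeyError there or at 'mapping[...]')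
def cgA_step (mmap : PySem.Dict Int Int) (cu : Int)
    (cadj : PySem.Dict Int (PySem.Dict Int Int)) (vw : Int × Int) :
    PySem.Dict Int (PySem.Dict Int Int) :=
  let cv := mmap.getD vw.1 0
  if cu ≠ cv then
    cadj.insert cu ((cadj.getD cu PySem.Dict.empty).insert cv
      ((cadj.getD cu PySem.Dict.empty).getD cv 0 + vw.2))
  else cadj

def coarsen_graph (n_nodes : Int) (adj : List (Int × List (Int × Int))) (mapping : List (Int × Int)) (n_coarse : Int) : List (Int × List (Int × Int)) :=
  let mmap : PySem.Dict Int Int := PySem.Dict.mk mapping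
  let madj : PySem.Dict Int (PySem.Dict Int Int) := PySem.Dict.mk (adj.map (fun p => (p.1, PySem.Dict.mk p.2)))
  -- coarse_adj = {i: {} for i in range(n_coarse)}
  let init : PySem.Dict Int (PySem.Dict Int Int) :=
    (PySem.List.pyRange 0 n_coarse 1).foldl (fun d i => d.insert i PySem.Dict.empty) PySem.Dict.empty
  -- for u in adj: cu = mapping[u]; <inner loop over adj[u].items()>
  let res := adj.foldl (fun cadj p =>
    (madj.getD p.1 PySem.Dict.empty).items.foldl (cgA_step mmap (mmap.getD p.1 0)) cadj) init
  res.items.map (fun q => (q.1, q.2.items))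

-- ===== PORT B =====
-- body of B's inner loop: 'cv = mapping[v]; if cv != i: r[cv] = r.get(cv, 0) + w'
def cgB_rowStep (mmap : PySem.Dict Int Int) (i : Int)
    (r : PySem.Dict Int Int) (vw : Int × Int) : PySem.Dict Int Int :=
  let cv := mmap.getD vw.1 0
  if cv ≠ i then r.insert cv (r.getD cv 0 + vw.2) else r

-- B's 'row(i)': 'r = {}; for u, nbrs in adj.items(): if mapping[u] != i: continue; <inner loop>'
def cgB_row (mmap : PySem.Dict Int Int) (adj : List (Int × List (Int × Int))) (i : Int) :
    PySem.Dict Int Int :=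
  adj.foldl (fun r p =>
    if mmap.getD p.1 0 ≠ i then r else p.2.foldl (cgB_rowStep mmap i) r) PySem.Dict.empty

def coarsen_graph_alt (n_nodes : Int) (adj : List (Int × List (Int × Int))) (mapping : List (Int × Int)) (n_coarse : Int) : List (Int × List (Int × Int)) :=
  let mmap : PySem.Dict Int Int := PySem.Dict.mk mapping
  -- '{i: row(i) for i in range(n_coarse)}': the range keys are distinct, so the
  -- comprehension's items are exactly this map
  (PySem.List.pyRange 0 n_coarse 1).map (fun i => (i, (cgB_row mmap adj i).items))

-- ===== PRECONDITION & SPEC =====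
-- Pre_ admits exactly the inputs on which the Python A returns: every iterated node key must be in
-- 'mapping' and each super-node cu with a cross edge must lie in range(n_coarse) (else A raises
-- KeyError); it also excludes association lists with duplicate dict keys, which do not correspond
-- to any Python dict input (a Python dict would have collapsed them).
def Pre_coarsen_graph (n_nodes : Int) (adj : List (Int × List (Int × Int))) (mapping : List (Int × Int)) (n_coarse : Int) : Prop :=
  (adj.map (·.1)).Nodup ∧ (mapping.map (·.1)).Nodup ∧
  (∀ p ∈ adj, (p.2.map (·.1)).Nodup) ∧
  (∀ p ∈ adj, (PySem.Dict.mk mapping).contains p.1 = true ∧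
    ∀ vw ∈ p.2, (PySem.Dict.mk mapping).contains vw.1 = true ∧
      ((PySem.Dict.mk mapping).getD p.1 0 ≠ (PySem.Dict.mk mapping).getD vw.1 0 →
        0 ≤ (PySem.Dict.mk mapping).getD p.1 0 ∧ (PySem.Dict.mk mapping).getD p.1 0 < n_coarse))
instance (n_nodes : Int) (adj : List (Int × List (Int × Int))) (mapping : List (Int × Int)) (n_coarse : Int) : Decidable (Pre_coarsen_graph n_nodes adj mapping n_coarse) := by unfold Pre_coarsen_graph; infer_instance

def pvWitness_coarsen_graph : Int × (List (Int × List (Int × Int))) × (List (Int × Int)) × Int :=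
  (3, [(0, [(1, 3), (2, 1)]), (1, [(0, 3)]), (2, [(0, 1)])], [(0, 0), (1, 1), (2, 0)], 2)

def Spec_coarsen_graph (n_nodes : Int) (adj : List (Int × List (Int × Int))) (mapping : List (Int × Int)) (n_coarse : Int) (out : List (Int × List (Int × Int))) : Prop := out = coarsen_graph_alt n_nodes adj mapping n_coarse
instance (n_nodes : Int) (adj : List (Int × List (Int × Int))) (mapping : List (Int × Int)) (n_coarse : Int) (out : List (Int × List (Int × Int))) : Decidable (Spec_coarsen_graph n_nodes adj mapping n_coarse out) := by unfold Spec_coarsen_graph; infer_instance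

-- ===== CLAIM (what is proved, stated in full; the proofs are below) =====
def Claim_equal_coarsen_graph : Prop := ∀ (n_nodes : Int) (adj : List (Int × List (Int × Int))) (mapping : List (Int × Int)) (n_coarse : Int), Dom_coarsen_graph n_nodes adj mapping n_coarse → Pre_coarsen_graph n_nodes adj mapping n_coarse → Spec_coarsen_graph n_nodes adj mapping n_coarse (coarsen_graph n_nodes adj mapping n_coarse)

-- ===== LEMMAS AND PROOFS =====

-- one A-step on the nested dict is, per entry, one B-row-step on the row at key cu
theorem stepA_items (mmap : PySem.Dict Int Int) (cu : Int)
    (N : PySem.Dict Int (PySem.Dict Int Int)) (hnd : N.keys.Nodup) (vw : Int × Int)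
    (hc : cu ≠ mmap.getD vw.1 0 → N.contains cu = true) :
    (cgA_step mmap cu N vw).items
      = N.items.map (fun q => if q.1 = cu then (q.1, cgB_rowStep mmap cu q.2 vw) else q) := by
  by_cases h : cu = mmap.getD vw.1 0
  · have heach : ∀ q ∈ N.items,
        (fun q : Int × PySem.Dict Int Int =>
          if q.1 = cu then (q.1, cgB_rowStep mmap cu q.2 vw) else q) q = id q := by
      intro q _
      show (if q.1 = cu then (q.1, cgB_rowStep mmap cu q.2 vw) else q) = q
      by_cases hq : q.1 = cu
      · rw [if_pos hq]
        show (q.1, cgB_rowStep mmap cu q.2 vw) = q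
        simp [cgB_rowStep, ← h]
      · rw [if_neg hq]
    rw [List.map_congr_left heach, List.map_id]
    simp only [cgA_step]
    rw [if_neg (by simp [← h])]
  · have hcon := hc h
    simp only [cgA_step]
    rw [if_pos h, PySem.Dict.items_insert_of_contains _ _ hcon]
    refine List.map_congr_left ?_
    intro q hq
    by_cases hqc : q.1 = cu
    · have hmem : (cu, q.2) ∈ N.items := by rw [← hqc]; exact hq
      have hgd : N.getD cu PySem.Dict.empty = q.2 :=
        PySem.Dict.getD_of_mem_items N hmem hnd _
      simp [hqc, hgd, cgB_rowStep, Ne.symm h]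
    · simp [hqc]

-- the step preserves the key list (inserts happen only at an existing key)
theorem stepA_keys (mmap : PySem.Dict Int Int) (cu : Int)
    (N : PySem.Dict Int (PySem.Dict Int Int)) (hnd : N.keys.Nodup) (vw : Int × Int)
    (hc : cu ≠ mmap.getD vw.1 0 → N.contains cu = true) :
    (cgA_step mmap cu N vw).keys = N.keys := by
  show (cgA_step mmap cu N vw).items.map (·.1) = N.items.map (·.1)
  rw [stepA_items mmap cu N hnd vw hc, List.map_map]
  refine List.map_congr_left ?_
  intro q _
  by_cases hq : q.1 = cu <;> simp [hq]

-- A's inner fold over one node's neighbours, seen entry-wise: only the row at cu changes,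
-- and it changes by B's inner fold
theorem innerA_items (mmap : PySem.Dict Int Int) (cu : Int) (l : List (Int × Int)) :
    ∀ N : PySem.Dict Int (PySem.Dict Int Int), N.keys.Nodup →
    ((∃ vw ∈ l, cu ≠ mmap.getD vw.1 0) → N.contains cu = true) →
    (l.foldl (cgA_step mmap cu) N).items
      = N.items.map (fun q =>
          if q.1 = cu then (q.1, l.foldl (cgB_rowStep mmap cu) q.2) else q) := by
  induction l with
  | nil =>
    intro N _ _
    have heach : ∀ q ∈ N.items,
        (fun q : Int × PySem.Dict Int Int =>
          if q.1 = cu then (q.1, List.foldl (cgB_rowStep mmap cu) q.2 []) else q) q = id q := by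
      intro q _
      show (if q.1 = cu then (q.1, List.foldl (cgB_rowStep mmap cu) q.2 []) else q) = q
      by_cases hq : q.1 = cu
      · rw [if_pos hq]
        rfl
      · rw [if_neg hq]
    rw [List.foldl_nil, List.map_congr_left heach, List.map_id]
  | cons vw l ih =>
    intro N hnd hc
    have hc1 : cu ≠ mmap.getD vw.1 0 → N.contains cu = true :=
      fun h => hc ⟨vw, List.mem_cons_self .., h⟩
    have hkeys := stepA_keys mmap cu N hnd vw hc1
    have hnd' : (cgA_step mmap cu N vw).keys.Nodup := hkeys ▸ hnd
    have hc' : (∃ vw' ∈ l, cu ≠ mmap.getD vw'.1 0) → (cgA_step mmap cu N vw).contains cu = true := by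
      intro h
      rw [PySem.Dict.contains_eq_decide_mem_keys, hkeys,
        ← PySem.Dict.contains_eq_decide_mem_keys]
      exact hc ⟨h.choose, List.mem_cons_of_mem _ h.choose_spec.1, h.choose_spec.2⟩
    simp only [List.foldl_cons]
    rw [ih (cgA_step mmap cu N vw) hnd' hc', stepA_items mmap cu N hnd vw hc1, List.map_map]
    refine List.map_congr_left ?_
    intro q _
    by_cases hq : q.1 = cu <;> simp [hq]

theorem innerA_keys (mmap : PySem.Dict Int Int) (cu : Int) (l : List (Int × Int))
    (N : PySem.Dict Int (PySem.Dict Int Int)) (hnd : N.keys.Nodup)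
    (hc : (∃ vw ∈ l, cu ≠ mmap.getD vw.1 0) → N.contains cu = true) :
    (l.foldl (cgA_step mmap cu) N).keys = N.keys := by
  show (l.foldl (cgA_step mmap cu) N).items.map (·.1) = N.items.map (·.1)
  rw [innerA_items mmap cu l N hnd hc, List.map_map]
  refine List.map_congr_left ?_
  intro q _
  by_cases hq : q.1 = cu <;> simp [hq]

-- A's whole outer loop, seen entry-wise: the row at each key i of the initial dict
-- becomes exactly B's row(i) computation started from that entry's value
theorem outerA_items (mmap : PySem.Dict Int Int) (madj : PySem.Dict Int (PySem.Dict Int Int))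
    (L : List (Int × List (Int × Int))) :
    ∀ N : PySem.Dict Int (PySem.Dict Int Int), N.keys.Nodup →
    (∀ p ∈ L, madj.getD p.1 PySem.Dict.empty = PySem.Dict.mk p.2) →
    (∀ p ∈ L, (∃ vw ∈ p.2, mmap.getD p.1 0 ≠ mmap.getD vw.1 0) →
      N.contains (mmap.getD p.1 0) = true) →
    (L.foldl (fun cadj p =>
        (madj.getD p.1 PySem.Dict.empty).items.foldl (cgA_step mmap (mmap.getD p.1 0)) cadj)
      N).items
      = N.items.map (fun q => (q.1, L.foldl (fun r p =>
          if mmap.getD p.1 0 ≠ q.1 then r else p.2.foldl (cgB_rowStep mmap q.1) r) q.2)) := by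
  induction L with
  | nil =>
    intro N _ _ _
    have heach : ∀ q ∈ N.items,
        (fun q : Int × PySem.Dict Int Int => (q.1, List.foldl
          (fun (r : PySem.Dict Int Int) (p : Int × List (Int × Int)) =>
            if mmap.getD p.1 0 ≠ q.1 then r
            else p.2.foldl (cgB_rowStep mmap q.1) r) q.2 [])) q = id q := by
      intro q _
      rfl
    rw [List.foldl_nil, List.map_congr_left heach, List.map_id]
  | cons p L ih =>
    intro N hnd hmd hc
    have hadj : (madj.getD p.1 PySem.Dict.empty).items = p.2 := by
      rw [hmd p (List.mem_cons_self ..)]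
    have hc1 : (∃ vw ∈ p.2, mmap.getD p.1 0 ≠ mmap.getD vw.1 0) →
        N.contains (mmap.getD p.1 0) = true := hc p (List.mem_cons_self ..)
    set N' := p.2.foldl (cgA_step mmap (mmap.getD p.1 0)) N with hN'
    have hkeys : N'.keys = N.keys := innerA_keys mmap _ p.2 N hnd hc1
    have hnd' : N'.keys.Nodup := hkeys ▸ hnd
    have hc' : ∀ p' ∈ L, (∃ vw ∈ p'.2, mmap.getD p'.1 0 ≠ mmap.getD vw.1 0) →
        N'.contains (mmap.getD p'.1 0) = true := by
      intro p' hp' h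
      rw [PySem.Dict.contains_eq_decide_mem_keys, hkeys,
        ← PySem.Dict.contains_eq_decide_mem_keys]
      exact hc p' (List.mem_cons_of_mem _ hp') h
    simp only [List.foldl_cons]
    rw [hadj, ih N' hnd' (fun p' hp' => hmd p' (List.mem_cons_of_mem _ hp')) hc',
      hN', innerA_items mmap _ p.2 N hnd hc1, List.map_map]
    refine List.map_congr_left ?_
    intro q _
    by_cases hq : q.1 = mmap.getD p.1 0
    · simp [hq]
    · have hq2 : mmap.getD p.1 0 ≠ q.1 := Ne.symm hq
      simp only [Function.comp_apply, if_neg hq, if_pos hq2]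

-- ===== VERDICT (by name: the statement is the Claim_ definition above) =====
theorem coarsen_graph_spec : Claim_equal_coarsen_graph := by
  intro n_nodes adj mapping n_coarse _hdom hpre
  obtain ⟨hadj, _hmap, _hinner, hkeys⟩ := hpre
  unfold Spec_coarsen_graph coarsen_graph coarsen_graph_alt
  simp only []
  set mmap : PySem.Dict Int Int := PySem.Dict.mk mapping with hmmap
  set madj : PySem.Dict Int (PySem.Dict Int Int) :=
    PySem.Dict.mk (adj.map (fun p => (p.1, PySem.Dict.mk p.2))) with hmadj
  set init : PySem.Dict Int (PySem.Dict Int Int) :=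
    (PySem.List.pyRange 0 n_coarse 1).foldl (fun d i => d.insert i PySem.Dict.empty)
      PySem.Dict.empty with hinit
  have hinit_items : init.items
      = (PySem.List.pyRange 0 n_coarse 1).map (fun i => (i, PySem.Dict.empty)) := by
    rw [hinit]
    have := PySem.Dict.items_foldl_insert_fresh (l := PySem.List.pyRange 0 n_coarse 1)
      (k := fun i => i) (v := fun _ => (PySem.Dict.empty : PySem.Dict Int Int))
      (d := PySem.Dict.empty)
      (fun a _ => PySem.Dict.contains_empty a)
      (by simpa using PySem.List.nodup_pyRange_one 0 n_coarse)
    simpa using this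
  have hinit_keys : init.keys = PySem.List.pyRange 0 n_coarse 1 := by
    show init.items.map (·.1) = _
    rw [hinit_items, List.map_map]
    refine (List.map_congr_left ?_).trans (List.map_id _)
    intro i _
    rfl
  have hnd : init.keys.Nodup := by
    rw [hinit_keys]; exact PySem.List.nodup_pyRange_one 0 n_coarse
  have hmd : ∀ p ∈ adj, madj.getD p.1 PySem.Dict.empty = PySem.Dict.mk p.2 := by
    intro p hp
    have hndm : madj.keys.Nodup := by
      show ((adj.map fun p => (p.1, PySem.Dict.mk p.2)).map (·.1)).Nodup
      rw [List.map_map]; exact hadj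
    exact PySem.Dict.getD_of_mem_items _
      (List.mem_map_of_mem (f := fun p => (p.1, PySem.Dict.mk p.2)) hp) hndm _
  have hc : ∀ p ∈ adj, (∃ vw ∈ p.2, mmap.getD p.1 0 ≠ mmap.getD vw.1 0) →
      init.contains (mmap.getD p.1 0) = true := by
    intro p hp h
    obtain ⟨vw, hvw, hne⟩ := h
    have hb := ((hkeys p hp).2 vw hvw).2 hne
    rw [PySem.Dict.contains_eq_decide_mem_keys, hinit_keys]
    simp [PySem.List.mem_pyRange_one, hb.1, hb.2]
  rw [outerA_items mmap madj adj init hnd hmd hc, hinit_items, List.map_map, List.map_map]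
  refine List.map_congr_left ?_
  intro i _
  rfl
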